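-- pv_equiv track=rewrite | github.com/impAcreat/ADHD-Eye-Tracking | analysis.py | merge_continuous_events
-- ===== SOURCE A (Python) =====
-- def merge_continuous_events(events):
--     merged = []
--     current_event = events[0]
--     start_idx = 0
--
--     for i in range(1, len(events)):
--         if events[i] != current_event:
--             merged.append((current_event, start_idx, i-1))  # (事件类型, 开始索引, 结束索引)
--             current_event = events[i]
--             start_idx = i
--     merged.append((current_event, start_idx, len(events)-1))  # 添加最后一个事件
--
--     return merged
-- ===== SOURCE B (Python) =====
-- def merge_continuous_events(events):
--     starts = [0] + [i for i in range(1, len(events)) if events[i] != events[i - 1]]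
--     ends = [s - 1 for s in starts[1:]] + [len(events) - 1]
--     return [(events[s], s, e) for s, e in zip(starts, ends)]
-- ===== Notes on version B (the rewrite author's own statement) =====
-- stated objective: alternative
-- what changed: Instead of A's stateful compare-and-flush loop, B first computes the list of change-point indices (where an element differs from its predecessor), derives the matching end indices, and zips them into labeled ranges - three staged passes with no run-tracking state.
import Mathlib
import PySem

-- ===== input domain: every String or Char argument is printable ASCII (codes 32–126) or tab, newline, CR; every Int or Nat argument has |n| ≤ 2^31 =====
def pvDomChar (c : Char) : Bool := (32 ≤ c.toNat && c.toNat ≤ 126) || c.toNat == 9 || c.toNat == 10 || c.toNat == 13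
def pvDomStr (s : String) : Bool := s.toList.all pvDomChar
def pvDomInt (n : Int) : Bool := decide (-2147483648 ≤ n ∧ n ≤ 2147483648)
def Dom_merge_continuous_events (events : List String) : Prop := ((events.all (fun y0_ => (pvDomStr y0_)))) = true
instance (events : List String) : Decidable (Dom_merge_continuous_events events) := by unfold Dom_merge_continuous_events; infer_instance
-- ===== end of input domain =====

-- B replaces A's stateful compare-and-flush loop by three staged passes:
-- change-point indices, matching end indices, then a zip; same O(n) cost.

-- ===== PORT A =====
-- state = (merged, current_event, start_idx); loop 'for i in range(1, len(events))'
def merge_continuous_events (events : List String) : List (String × Int × Int) :=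
  match events with
  | [] => []  -- Python raises IndexError at events[0]; excluded by Pre_
  | e0 :: _ =>
    let n : Int := events.length
    let s := (PySem.List.pyRange 1 n 1).foldl
      (fun (st : List (String × Int × Int) × String × Int) i =>
        let ev := PySem.List.pyGetD events i ""
        if ev ≠ st.2.1 then (st.1 ++ [(st.2.1, st.2.2, i - 1)], ev, i) else st)
      ([], e0, 0)
    s.1 ++ [(s.2.1, s.2.2, n - 1)]

-- ===== PORT B =====
-- starts = [0] + change points; ends = shifted starts minus one, plus n-1; zip them.
def merge_continuous_events_alt (events : List String) : List (String × Int × Int) :=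
  let n : Int := events.length
  let starts : List Int :=
    0 :: (PySem.List.pyRange 1 n 1).filter
      (fun i => PySem.List.pyGetD events i "" ≠ PySem.List.pyGetD events (i - 1) "")
  let ends : List Int := (starts.drop 1).map (fun s => s - 1) ++ [n - 1]
  (starts.zip ends).map (fun p => (PySem.List.pyGetD events p.1 "", p.1, p.2))

-- ===== PRECONDITION & SPEC =====
-- A reads events[0] before the loop, so it raises IndexError on the empty list.
def Pre_merge_continuous_events (events : List String) : Prop := events ≠ []
instance (events : List String) : Decidable (Pre_merge_continuous_events events) := by unfold Pre_merge_continuous_events; infer_instance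
def pvWitness_merge_continuous_events : List String := ["a", "a", "b"]

def Spec_merge_continuous_events (events : List String) (out : List (String × Int × Int)) : Prop := out = merge_continuous_events_alt events
instance (events : List String) (out : List (String × Int × Int)) : Decidable (Spec_merge_continuous_events events out) := by unfold Spec_merge_continuous_events; infer_instance

-- ===== CLAIM (what is proved, stated in full; the proofs are below) =====
def Claim_equal_merge_continuous_events : Prop := ∀ (events : List String), Dom_merge_continuous_events events → Pre_merge_continuous_events events → Spec_merge_continuous_events events (merge_continuous_events events)

-- ===== LEMMAS AND PROOFS =====

-- Direct recursive rendering of A's loop body over the remaining suffix of events.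
def pvAuxA (cur : String) (start i : Int) : List String → List (String × Int × Int)
  | [] => [(cur, start, i - 1)]
  | x :: xs => if x ≠ cur then (cur, start, i - 1) :: pvAuxA x i (i + 1) xs
               else pvAuxA cur start (i + 1) xs

-- Common middle form: segments generated by a list of change indices.
def pvG (events : List String) : List Int → Int → List (String × Int × Int)
  | [], s => [(PySem.List.pyGetD events s "", s, (events.length : Int) - 1)]
  | c :: cs, s => (PySem.List.pyGetD events s "", s, c - 1) :: pvG events cs c

theorem pv_fold_eq_aux (events : List String) :
    ∀ (l pre : List String) (cur : String) (start : Int)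
      (merged : List (String × Int × Int)),
      events = pre ++ l →
      (let s := (PySem.List.pyRange (pre.length : Int) (events.length : Int) 1).foldl
        (fun (st : List (String × Int × Int) × String × Int) i =>
          let ev := PySem.List.pyGetD events i ""
          if ev ≠ st.2.1 then (st.1 ++ [(st.2.1, st.2.2, i - 1)], ev, i) else st)
        (merged, cur, start)
       s.1 ++ [(s.2.1, s.2.2, (events.length : Int) - 1)])
      = merged ++ pvAuxA cur start (pre.length : Int) l := by
  intro l
  induction l with
  | nil =>
    intro pre cur start merged he
    have hlen : events.length = pre.length := by simp [he]
    rw [PySem.List.pyRange_one_eq_nil (by simp [hlen])]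
    simp [pvAuxA, hlen]
  | cons x xs ih =>
    intro pre cur start merged he
    have hlt : (pre.length : Int) < (events.length : Int) := by
      subst he; simp
    rw [PySem.List.pyRange_one_cons hlt]
    have hget : PySem.List.pyGetD events (pre.length : Int) "" = x := by
      subst he
      rw [PySem.List.pyGetD_natCast]
      simp
    simp only [List.foldl_cons, hget]
    by_cases hx : x = cur
    · simp only [hx, ne_eq, not_true_eq_false, ite_false]
      have := ih (pre ++ [cur]) cur start merged (by simp [he, hx])
      simp only [List.length_append, List.length_cons, List.length_nil] at this
      push_cast at this ⊢
      rw [this]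
      simp [pvAuxA]
    · simp only [ne_eq, hx, not_false_iff, if_pos]
      have := ih (pre ++ [x]) x (pre.length : Int)
        (merged ++ [(cur, start, (pre.length : Int) - 1)]) (by simp [he])
      simp only [List.length_append, List.length_cons, List.length_nil] at this
      push_cast at this ⊢
      rw [this]
      simp [pvAuxA, hx]

-- A's suffix recursion produces exactly the segments of the change-index list.
theorem pv_aux_eq_G (events : List String) :
    ∀ (l pre : List String) (cur : String) (start : Int),
      events = pre ++ l →
      PySem.List.pyGetD events ((pre.length : Int) - 1) "" = cur →
      PySem.List.pyGetD events start "" = cur →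
      pvAuxA cur start (pre.length : Int) l
        = pvG events
            ((PySem.List.pyRange (pre.length : Int) (events.length : Int) 1).filter
              (fun i => PySem.List.pyGetD events i "" ≠ PySem.List.pyGetD events (i - 1) ""))
            start := by
  intro l
  induction l with
  | nil =>
    intro pre cur start he _ hstart
    have hlen : events.length = pre.length := by simp [he]
    rw [PySem.List.pyRange_one_eq_nil (by simp [hlen])]
    simp [pvAuxA, pvG, hlen, hstart]
  | cons x xs ih =>
    intro pre cur start he hprev hstart
    have hlt : (pre.length : Int) < (events.length : Int) := by subst he; simp
    have hget : PySem.List.pyGetD events (pre.length : Int) "" = x := by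
      subst he; rw [PySem.List.pyGetD_natCast]; simp
    rw [PySem.List.pyRange_one_cons hlt]
    by_cases hx : x = cur
    · subst hx
      rw [List.filter_cons_of_neg (by simp [hget, hprev])]
      have hprev' : PySem.List.pyGetD events (((pre ++ [x]).length : Int) - 1) "" = x := by
        simpa using hget
      have := ih (pre ++ [x]) x start (by simp [he]) hprev' hstart
      simp only [List.length_append, List.length_cons, List.length_nil] at this
      push_cast at this
      rw [show pvAuxA x start ((pre.length : Int)) (x :: xs)
          = pvAuxA x start ((pre.length : Int) + 1) xs from by simp [pvAuxA]]
      exact this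
    · rw [List.filter_cons_of_pos (by simp [hget, hprev, hx])]
      have hprev' : PySem.List.pyGetD events (((pre ++ [x]).length : Int) - 1) "" = x := by
        simpa using hget
      have := ih (pre ++ [x]) x (pre.length : Int) (by simp [he]) hprev' hget
      simp only [List.length_append, List.length_cons, List.length_nil] at this
      push_cast at this
      rw [show pvAuxA cur start ((pre.length : Int)) (x :: xs)
          = (cur, start, (pre.length : Int) - 1)
              :: pvAuxA x (pre.length : Int) ((pre.length : Int) + 1) xs
          from by simp [pvAuxA, hx]]
      rw [this]
      simp [pvG, hstart]

-- B's zip of starts and ends produces the same segments.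
theorem pvB_zip (events : List String) :
    ∀ (cs : List Int) (s : Int),
      (((s :: cs).zip ((cs.map (fun x => x - 1)) ++ [(events.length : Int) - 1])).map
        (fun p => (PySem.List.pyGetD events p.1 "", p.1, p.2))) = pvG events cs s := by
  intro cs
  induction cs with
  | nil => intro s; simp [pvG]
  | cons c cs ih => intro s; simp only [List.map_cons, List.cons_append,
      List.zip_cons_cons, List.map_cons, pvG, ih]

-- ===== VERDICT (by name: the statement is the Claim_ definition above) =====
theorem merge_continuous_events_spec : Claim_equal_merge_continuous_events := by
  intro events _ hpre
  unfold Spec_merge_continuous_events merge_continuous_events merge_continuous_events_alt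
  match events, hpre with
  | e0 :: rest, _ =>
    have h := pv_fold_eq_aux (e0 :: rest) rest [e0] e0 0 [] (by simp)
    have h0 : PySem.List.pyGetD (e0 :: rest) (0 : Int) "" = e0 := by
      simp [PySem.List.pyGetD, PySem.List.pyGet?, PySem.List.pyIdx?]
    have hg := pv_aux_eq_G (e0 :: rest) rest [e0] e0 0 (by simp) (by simpa using h0) h0
    have hz := pvB_zip (e0 :: rest)
      (((PySem.List.pyRange (1 : Int) ((e0 :: rest).length : Int) 1).filter
        (fun i => PySem.List.pyGetD (e0 :: rest) i "" ≠ PySem.List.pyGetD (e0 :: rest) (i - 1) ""))) 0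
    simp only [List.length_cons, List.length_nil] at h hg hz ⊢
    push_cast at h hg hz ⊢
    rw [h, hg]
    simp only [List.nil_append, List.drop_succ_cons, List.drop_zero]
    rw [← hz]
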